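-- pv_equiv track=rewrite | github.com/DELTAgeorge4/CS425_Capstone | Georges_Scripts/arp_topology.py | categorize_devices
-- ===== SOURCE A (Python) =====
-- def categorize_devices(arp_entries, interfaces):
--     """Categorize devices from ARP table based on MAC OUIs and other heuristics"""
--     categories = {
--         "routers": [],
--         "switches": [],
--         "servers": [],
--         "endpoints": []
--     }
--
--     # Common networking equipment MAC prefixes
--     network_ouis = {
--         "9C:05:D6": "Ubiquiti",
--         "DC:9F:DB": "Ubiquiti",
--         "00:00:0C": "Cisco",
--         "00:1A:A1": "Cisco",
--         "BC:24:11": "HP Enterprise"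
--         # Add more as needed
--     }
--
--     # Common server MAC prefixes
--     server_ouis = {
--         "00:50:56": "VMware",
--         "00:0C:29": "VMware",
--         "00:16:3E": "Xen",
--         "00:1E:67": "Intel Server",
--         "A0:36:9F": "Intel Server"
--         # Add more as needed
--     }
--
--     # Group by interface
--     per_interface = {}
--     for entry in arp_entries:
--         if_index = entry["if_index"]
--         if if_index not in per_interface:
--             per_interface[if_index] = []
--         per_interface[if_index].append(entry)
--
--     # Process entries by interface
--     for if_index, entries in per_interface.items():
--         interface_name = interfaces.get(if_index, {}).get("name", f"Interface {if_index}")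
--
--         # Group entries by device type
--         for entry in entries:
--             ip = entry["ip_addr"]
--             mac = entry["mac_addr"].upper()
--             mac_prefix = mac[:8]
--
--             # Skip certain special IPs
--             if ip.startswith("169.254.") or ip.startswith("224."):
--                 continue
--
--             # Try to identify device type
--             if mac_prefix in network_ouis:
--                 # This is likely a network device
--                 if '.1.' in ip or '.254.' in ip:
--                     # Likely a router
--                     categories["routers"].append({
--                         "ip": ip,
--                         "mac": mac,
--                         "vendor": network_ouis[mac_prefix],
--                         "interface": interface_name
--                     })
--                 else:
--                     # Likely a switch
--                     categories["switches"].append({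
--                         "ip": ip,
--                         "mac": mac,
--                         "vendor": network_ouis[mac_prefix],
--                         "interface": interface_name
--                     })
--             elif mac_prefix in server_ouis:
--                 # This is likely a server
--                 categories["servers"].append({
--                     "ip": ip,
--                     "mac": mac,
--                     "vendor": server_ouis[mac_prefix],
--                     "interface": interface_name
--                 })
--             else:
--                 # Regular endpoint
--                 categories["endpoints"].append({
--                     "ip": ip,
--                     "mac": mac,
--                     "interface": interface_name
--                 })
--
--     return categories
-- ===== SOURCE B (Python) =====
-- def categorize_devices(arp_entries, interfaces):
--     """Categorize devices from ARP table based on MAC OUIs and other heuristics"""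
--     # first-appearance order of each interface index
--     order = {}
--     for e in arp_entries:
--         order.setdefault(e["if_index"], len(order))
--     # stable sort: entries grouped by interface in first-appearance order,
--     # original order preserved within each interface
--     entries = sorted(arp_entries, key=lambda e: order[e["if_index"]])
--
--     # merged OUI table: prefix -> (kind, vendor)
--     oui = {
--         "9C:05:D6": ("net", "Ubiquiti"),
--         "DC:9F:DB": ("net", "Ubiquiti"),
--         "00:00:0C": ("net", "Cisco"),
--         "00:1A:A1": ("net", "Cisco"),
--         "BC:24:11": ("net", "HP Enterprise"),
--         "00:50:56": ("srv", "VMware"),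
--         "00:0C:29": ("srv", "VMware"),
--         "00:16:3E": ("srv", "Xen"),
--         "00:1E:67": ("srv", "Intel Server"),
--         "A0:36:9F": ("srv", "Intel Server"),
--     }
--
--     categories = {"routers": [], "switches": [], "servers": [], "endpoints": []}
--     for e in entries:
--         ip = e["ip_addr"]
--         mac = e["mac_addr"].upper()
--         if ip.startswith("169.254.") or ip.startswith("224."):
--             continue
--         name = interfaces.get(e["if_index"], {}).get("name", f"Interface {e['if_index']}")
--         hit = oui.get(mac[:8])
--         if hit is None:
--             categories["endpoints"].append({"ip": ip, "mac": mac, "interface": name})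
--         else:
--             kind, vendor = hit
--             if kind == "net":
--                 cat = "routers" if (".1." in ip or ".254." in ip) else "switches"
--             else:
--                 cat = "servers"
--             categories[cat].append({"ip": ip, "mac": mac, "vendor": vendor, "interface": name})
--     return categories
-- ===== Notes on version B (the rewrite author's own statement) =====
-- stated objective: alternative
-- what changed: A groups rows into a dict of per-interface lists and then runs a nested double loop over the groups; B instead builds a first-appearance rank index, stably sorts the entries by that rank, merges the two OUI dicts into one prefix->(kind,vendor) table, and classifies everything in a single flat pass.
import Mathlib
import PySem

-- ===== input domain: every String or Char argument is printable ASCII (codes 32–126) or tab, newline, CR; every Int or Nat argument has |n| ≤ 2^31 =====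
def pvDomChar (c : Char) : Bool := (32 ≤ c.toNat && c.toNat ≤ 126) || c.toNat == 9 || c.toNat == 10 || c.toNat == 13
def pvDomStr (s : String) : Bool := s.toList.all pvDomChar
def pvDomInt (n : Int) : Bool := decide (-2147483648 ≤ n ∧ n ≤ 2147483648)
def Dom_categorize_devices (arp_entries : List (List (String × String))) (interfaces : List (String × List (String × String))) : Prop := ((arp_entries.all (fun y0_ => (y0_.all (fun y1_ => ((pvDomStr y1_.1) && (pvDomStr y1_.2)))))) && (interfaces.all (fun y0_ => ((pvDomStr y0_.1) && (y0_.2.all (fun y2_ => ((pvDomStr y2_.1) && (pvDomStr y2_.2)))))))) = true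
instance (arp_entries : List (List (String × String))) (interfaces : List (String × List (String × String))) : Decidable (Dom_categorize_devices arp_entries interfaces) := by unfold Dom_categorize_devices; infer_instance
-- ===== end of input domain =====

-- B replaces A's group-into-a-dict-then-double-loop with a first-appearance rank index, a
-- stable sort of the entries by that rank, a single merged OUI table and one flat pass
-- (objective: alternative decomposition, same results).

-- ===== PORT A =====

-- entry["k"]: first-match lookup in the entry's association list (KeyError → default,
-- excluded by Pre_); shared by both ports as the dict-subscript primitive.
def pvEGet (e : List (String × String)) (k : String) (dflt : String) : String :=
  ((PySem.Dict.mk e).get? k).getD dflt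

-- interfaces.get(if_index, {}).get("name", f"Interface {if_index}") — shared dict-lookup expression
def pvInterfaceName (interfaces : List (String × List (String × String))) (if_index : String) : String :=
  ((PySem.Dict.mk (((PySem.Dict.mk interfaces).get? if_index).getD [])).get? "name").getD
    ("Interface " ++ if_index)

def pvNetworkOuis : PySem.Dict String String :=
  PySem.Dict.ofList [("9C:05:D6", "Ubiquiti"), ("DC:9F:DB", "Ubiquiti"), ("00:00:0C", "Cisco"),
    ("00:1A:A1", "Cisco"), ("BC:24:11", "HP Enterprise")]

def pvServerOuis : PySem.Dict String String :=
  PySem.Dict.ofList [("00:50:56", "VMware"), ("00:0C:29", "VMware"), ("00:16:3E", "Xen"),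
    ("00:1E:67", "Intel Server"), ("A0:36:9F", "Intel Server")]

-- body of A's inner `for entry in entries` loop (interface_name fixed per group)
def pvAStep (interface_name : String) (cats : PySem.Dict String (List (List (String × String))))
    (entry : List (String × String)) : PySem.Dict String (List (List (String × String))) :=
  let ip := pvEGet entry "ip_addr" ""
  let mac := PySem.Str.upper (pvEGet entry "mac_addr" "")
  let mac_prefix := PySem.Str.slice mac none (some 8)
  if PySem.Str.startswith ip "169.254." || PySem.Str.startswith ip "224." then cats
  else if pvNetworkOuis.contains mac_prefix then
    if PySem.Str.isIn ".1." ip || PySem.Str.isIn ".254." ip then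
      cats.modify "routers" [] (· ++ [[("ip", ip), ("mac", mac),
        ("vendor", pvNetworkOuis.getD mac_prefix ""), ("interface", interface_name)]])
    else
      cats.modify "switches" [] (· ++ [[("ip", ip), ("mac", mac),
        ("vendor", pvNetworkOuis.getD mac_prefix ""), ("interface", interface_name)]])
  else if pvServerOuis.contains mac_prefix then
    cats.modify "servers" [] (· ++ [[("ip", ip), ("mac", mac),
      ("vendor", pvServerOuis.getD mac_prefix ""), ("interface", interface_name)]])
  else
    cats.modify "endpoints" [] (· ++ [[("ip", ip), ("mac", mac), ("interface", interface_name)]])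

def categorize_devices (arp_entries : List (List (String × String)))
    (interfaces : List (String × List (String × String))) :
    List (String × List (List (String × String))) :=
  let categories : PySem.Dict String (List (List (String × String))) :=
    PySem.Dict.ofList [("routers", []), ("switches", []), ("servers", []), ("endpoints", [])]
  let per_interface : PySem.Dict String (List (List (String × String))) :=
    arp_entries.foldl (fun d entry =>
      let if_index := pvEGet entry "if_index" ""
      let d' := if d.contains if_index then d else d.insert if_index []
      d'.modify if_index [] (· ++ [entry])) PySem.Dict.empty
  (per_interface.items.foldl (fun cats kv =>
      kv.2.foldl (pvAStep (pvInterfaceName interfaces kv.1)) cats) categories).items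

-- ===== PORT B =====

-- merged table: prefix -> (kind, vendor)
def pvOuiTable : PySem.Dict String (String × String) :=
  PySem.Dict.ofList [("9C:05:D6", ("net", "Ubiquiti")), ("DC:9F:DB", ("net", "Ubiquiti")),
    ("00:00:0C", ("net", "Cisco")), ("00:1A:A1", ("net", "Cisco")),
    ("BC:24:11", ("net", "HP Enterprise")), ("00:50:56", ("srv", "VMware")),
    ("00:0C:29", ("srv", "VMware")), ("00:16:3E", ("srv", "Xen")),
    ("00:1E:67", ("srv", "Intel Server")), ("A0:36:9F", ("srv", "Intel Server"))]

-- body of B's single flat `for e in entries` loop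
def pvBStep (interfaces : List (String × List (String × String)))
    (cats : PySem.Dict String (List (List (String × String))))
    (e : List (String × String)) : PySem.Dict String (List (List (String × String))) :=
  let ip := pvEGet e "ip_addr" ""
  let mac := PySem.Str.upper (pvEGet e "mac_addr" "")
  if PySem.Str.startswith ip "169.254." || PySem.Str.startswith ip "224." then cats
  else
    let name := pvInterfaceName interfaces (pvEGet e "if_index" "")
    match pvOuiTable.get? (PySem.Str.slice mac none (some 8)) with
    | none =>
        cats.modify "endpoints" [] (· ++ [[("ip", ip), ("mac", mac), ("interface", name)]])
    | some kv =>
        let cat := if kv.1 == "net" then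
            (if PySem.Str.isIn ".1." ip || PySem.Str.isIn ".254." ip then "routers" else "switches")
          else "servers"
        cats.modify cat [] (· ++ [[("ip", ip), ("mac", mac), ("vendor", kv.2), ("interface", name)]])

def categorize_devices_alt (arp_entries : List (List (String × String)))
    (interfaces : List (String × List (String × String))) :
    List (String × List (List (String × String))) :=
  let order : PySem.Dict String Int :=
    arp_entries.foldl (fun d e => d.setdefault (pvEGet e "if_index" "") (d.size : Int))
      PySem.Dict.empty
  let entries := PySem.List.sorted arp_entries (fun e => order.getD (pvEGet e "if_index" "") 0)
  let categories : PySem.Dict String (List (List (String × String))) :=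
    PySem.Dict.ofList [("routers", []), ("switches", []), ("servers", []), ("endpoints", [])]
  (entries.foldl (pvBStep interfaces) categories).items

-- ===== PRECONDITION & SPEC =====

-- Pre_ excludes exactly the inputs where A raises KeyError: some ARP entry lacking one of
-- the keys "if_index", "ip_addr", "mac_addr".
def Pre_categorize_devices (arp_entries : List (List (String × String)))
    (interfaces : List (String × List (String × String))) : Prop :=
  ∀ e ∈ arp_entries,
    "if_index" ∈ e.map Prod.fst ∧ "ip_addr" ∈ e.map Prod.fst ∧ "mac_addr" ∈ e.map Prod.fst

instance (arp_entries : List (List (String × String))) (interfaces : List (String × List (String × String))) : Decidable (Pre_categorize_devices arp_entries interfaces) := by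
  unfold Pre_categorize_devices; infer_instance

def pvWitness_categorize_devices :
    (List (List (String × String))) × (List (String × List (String × String))) :=
  ([[("if_index", "1"), ("ip_addr", "10.0.1.5"), ("mac_addr", "9c:05:d6:aa:bb:cc")]],
   [("1", [("name", "eth0")])])

def Spec_categorize_devices (arp_entries : List (List (String × String))) (interfaces : List (String × List (String × String))) (out : List (String × List (List (String × String)))) : Prop := out = categorize_devices_alt arp_entries interfaces
instance (arp_entries : List (List (String × String))) (interfaces : List (String × List (String × String))) (out : List (String × List (List (String × String)))) : Decidable (Spec_categorize_devices arp_entries interfaces out) := by unfold Spec_categorize_devices; infer_instance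

-- ===== CLAIM (what is proved, stated in full; the proofs are below) =====
def Claim_equal_categorize_devices : Prop := ∀ (arp_entries : List (List (String × String))) (interfaces : List (String × List (String × String))), Dom_categorize_devices arp_entries interfaces → Pre_categorize_devices arp_entries interfaces → Spec_categorize_devices arp_entries interfaces (categorize_devices arp_entries interfaces)

-- ===== LEMMAS AND PROOFS =====

-- the grouping key of an entry
def pvKey (e : List (String × String)) : String := pvEGet e "if_index" ""

-- distinct keys in first-appearance order, and the group of a key
def pvD (arp_entries : List (List (String × String))) : List String :=
  PySem.List.dedup (arp_entries.map pvKey)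

def pvG (arp_entries : List (List (String × String))) (k : String) :
    List (List (String × String)) :=
  arp_entries.filter (fun e => pvKey e == k)

-- the initial categories dict
def pvInit : PySem.Dict String (List (List (String × String))) :=
  PySem.Dict.ofList [("routers", []), ("switches", []), ("servers", []), ("endpoints", [])]

-- A's step with the interface name recomputed from the entry itself
def pvFull (interfaces : List (String × List (String × String)))
    (cats : PySem.Dict String (List (List (String × String))))
    (e : List (String × String)) : PySem.Dict String (List (List (String × String))) :=
  pvAStep (pvInterfaceName interfaces (pvKey e)) cats e

-- the two loop bodies agree pointwise (case analysis over the ten OUI prefixes)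
set_option maxHeartbeats 2000000 in
theorem pvStep_eq (interfaces : List (String × List (String × String)))
    (cats : PySem.Dict String (List (List (String × String)))) (e : List (String × String)) :
    pvBStep interfaces cats e = pvFull interfaces cats e := by
  unfold pvBStep pvFull pvAStep pvKey
  refine if_congr Iff.rfl rfl ?_
  generalize (PySem.Str.slice (PySem.Str.upper (pvEGet e "mac_addr" "")) none (some 8)) = p
  have hn : pvNetworkOuis = PySem.Dict.mk [("9C:05:D6", "Ubiquiti"), ("DC:9F:DB", "Ubiquiti"), ("00:00:0C", "Cisco"), ("00:1A:A1", "Cisco"), ("BC:24:11", "HP Enterprise")] := by decide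
  have hs : pvServerOuis = PySem.Dict.mk [("00:50:56", "VMware"), ("00:0C:29", "VMware"), ("00:16:3E", "Xen"), ("00:1E:67", "Intel Server"), ("A0:36:9F", "Intel Server")] := by decide
  have ho : pvOuiTable = PySem.Dict.mk [("9C:05:D6", ("net", "Ubiquiti")), ("DC:9F:DB", ("net", "Ubiquiti")), ("00:00:0C", ("net", "Cisco")), ("00:1A:A1", ("net", "Cisco")), ("BC:24:11", ("net", "HP Enterprise")), ("00:50:56", ("srv", "VMware")), ("00:0C:29", ("srv", "VMware")), ("00:16:3E", ("srv", "Xen")), ("00:1E:67", ("srv", "Intel Server")), ("A0:36:9F", ("srv", "Intel Server"))] := by decide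
  rw [hn, hs, ho]
  simp only [PySem.Dict.get?_mk_cons, PySem.Dict.contains_mk, PySem.Dict.getD,
    List.any_cons, List.any_nil]
  cases hb1 : ("9C:05:D6" == p) with
  | true => cases hc : (PySem.Str.isIn ".1." (pvEGet e "ip_addr" "") || PySem.Str.isIn ".254." (pvEGet e "ip_addr" "")) <;> simp_all
  | false =>
    cases hb2 : ("DC:9F:DB" == p) with
    | true => cases hc : (PySem.Str.isIn ".1." (pvEGet e "ip_addr" "") || PySem.Str.isIn ".254." (pvEGet e "ip_addr" "")) <;> simp_all
    | false =>
      cases hb3 : ("00:00:0C" == p) with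
      | true => cases hc : (PySem.Str.isIn ".1." (pvEGet e "ip_addr" "") || PySem.Str.isIn ".254." (pvEGet e "ip_addr" "")) <;> simp_all
      | false =>
        cases hb4 : ("00:1A:A1" == p) with
        | true => cases hc : (PySem.Str.isIn ".1." (pvEGet e "ip_addr" "") || PySem.Str.isIn ".254." (pvEGet e "ip_addr" "")) <;> simp_all
        | false =>
          cases hb5 : ("BC:24:11" == p) with
          | true => cases hc : (PySem.Str.isIn ".1." (pvEGet e "ip_addr" "") || PySem.Str.isIn ".254." (pvEGet e "ip_addr" "")) <;> simp_all
          | false =>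
            cases hb6 : ("00:50:56" == p) with
            | true => simp_all
            | false =>
              cases hb7 : ("00:0C:29" == p) with
              | true => simp_all
              | false =>
                cases hb8 : ("00:16:3E" == p) with
                | true => simp_all
                | false =>
                  cases hb9 : ("00:1E:67" == p) with
                  | true => simp_all
                  | false =>
                    cases hb10 : ("A0:36:9F" == p) with
                    | true => simp_all
                    | false =>
                      simp_all [PySem.Dict.get?]

-- insertBy places x after every element it is not strictly before
theorem pvInsertBy_split {α : Type} (before : α → α → Bool) (x : α) (ys zs : List α)
    (h1 : ∀ y ∈ ys, before x y = false) (h2 : ∀ z ∈ zs, before x z = true) :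
    PySem.List.insertBy before x (ys ++ zs) = ys ++ x :: zs := by
  induction ys with
  | nil =>
    cases zs with
    | nil => simp [PySem.List.insertBy]
    | cons z t => simp [PySem.List.insertBy, h2 z (List.mem_cons_self)]
  | cons y ys ih =>
    simp only [List.cons_append, PySem.List.insertBy, h1 y (List.mem_cons_self),
      Bool.false_eq_true, if_false]
    rw [ih (fun y hy => h1 y (List.mem_cons_of_mem _ hy))]

theorem pvPrefix_foldl_add (l : List String) (s : PySem.Set String) :
    s <+: l.foldl PySem.Set.add s := by
  induction l generalizing s with
  | nil => exact List.prefix_refl s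
  | cons a l ih =>
    refine List.IsPrefix.trans ?_ (ih (PySem.Set.add s a))
    unfold PySem.Set.add
    split
    · exact List.prefix_refl s
    · exact List.prefix_append s [a]

theorem pvDedup_prefix (xs ys : List String) :
    PySem.List.dedup xs <+: PySem.List.dedup (xs ++ ys) := by
  unfold PySem.List.dedup
  rw [PySem.Set.ofList_eq_foldl xs, PySem.Set.ofList_eq_foldl (xs ++ ys), List.foldl_append]
  exact pvPrefix_foldl_add ys _

theorem pvIdxOf_of_prefix {d1 d2 : List String} (h : d1 <+: d2) {a : String} (ha : a ∈ d1) :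
    d2.idxOf a = d1.idxOf a := by
  obtain ⟨t, rfl⟩ := h
  rw [List.idxOf_append, if_pos ha]

theorem pvDedup_append_singleton (xs : List String) (a : String) :
    PySem.List.dedup (xs ++ [a]) =
      if a ∈ xs then PySem.List.dedup xs else PySem.List.dedup xs ++ [a] := by
  unfold PySem.List.dedup
  rw [PySem.Set.ofList_eq_foldl (xs ++ [a]), List.foldl_append, ← PySem.Set.ofList_eq_foldl]
  simp only [List.foldl_cons, List.foldl_nil]
  unfold PySem.Set.add
  rcases Bool.eq_false_or_eq_true ((PySem.Set.ofList xs).contains a) with h | h <;>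
    simp_all [PySem.Set.contains, PySem.Set.mem_ofList]

theorem pvNodup_pvD (arp : List (List (String × String))) : (pvD arp).Nodup :=
  PySem.Set.nodup_ofList _

theorem pvSorted_eq (rk : List (String × String) → Int) (l : List (List (String × String)))
    (H : ∀ e ∈ l, rk e = ((pvD l).idxOf (pvKey e) : Int)) :
    l.foldl (fun acc x => PySem.List.insertBy (fun a b => decide (rk a < rk b)) x acc) [] =
      (pvD l).flatMap (pvG l) := by
  induction l using List.reverseRecOn with
  | nil => simp [pvD, PySem.List.dedup, PySem.Set.ofList_eq_foldl]
  | append_singleton t x IH =>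
    rw [List.foldl_append, List.foldl_cons, List.foldl_nil]
    have hpre : pvD t <+: pvD (t ++ [x]) := by
      unfold pvD; rw [List.map_append]; exact pvDedup_prefix _ _
    have hmemD : ∀ e ∈ t, pvKey e ∈ pvD t := by
      intro e he
      unfold pvD
      rw [PySem.List.mem_dedup]
      exact List.mem_map_of_mem he
    have Ht : ∀ e ∈ t, rk e = ((pvD t).idxOf (pvKey e) : Int) := by
      intro e he
      rw [H e (List.mem_append_left _ he), pvIdxOf_of_prefix hpre (hmemD e he)]
    rw [IH Ht]
    have hGsplit : ∀ k, pvG (t ++ [x]) k = pvG t k ++ (if pvKey x == k then [x] else []) := by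
      intro k
      unfold pvG
      rw [List.filter_append]
      simp [List.filter_cons]
    have hrk_mem : ∀ k ∈ pvD t, ∀ y ∈ pvG t k, rk y = ((pvD t).idxOf k : Int) ∧ y ∈ t := by
      intro k hk y hy
      unfold pvG at hy
      rw [List.mem_filter] at hy
      obtain ⟨hyt, hyk⟩ := hy
      have : pvKey y = k := by simpa using hyk
      exact ⟨by rw [Ht y hyt, this], hyt⟩
    have hfm : ∀ (ks : List String), (∀ k ∈ ks, k ≠ pvKey x) →
        ks.flatMap (pvG (t ++ [x])) = ks.flatMap (pvG t) := by
      intro ks hks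
      rw [List.flatMap_def, List.flatMap_def]
      congr 1
      refine List.map_congr_left (fun k hk => ?_)
      rw [hGsplit k]
      have : (pvKey x == k) = false := by
        rw [beq_eq_false_iff_ne]
        exact fun h => hks k hk h.symm
      simp [this]
    have hDx : pvD (t ++ [x]) = if pvKey x ∈ t.map pvKey then pvD t else pvD t ++ [pvKey x] := by
      unfold pvD
      rw [List.map_append, List.map_cons, List.map_nil, pvDedup_append_singleton]
    by_cases hmem : pvKey x ∈ t.map pvKey
    · -- seen key: x is appended at the end of its group
      rw [hDx, if_pos hmem] at H ⊢
      have hkD : pvKey x ∈ pvD t := by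
        unfold pvD; rw [PySem.List.mem_dedup]; exact hmem
      set i := (pvD t).idxOf (pvKey x) with hi
      have hilt : i < (pvD t).length := List.idxOf_lt_length_iff.mpr hkD
      have hrkx : rk x = (i : Int) := H x (List.mem_append_right _ (List.mem_cons_self))
      have hgetI : (pvD t)[i]'hilt = pvKey x := List.getElem_idxOf hilt
      have htd := List.take_append_drop (i + 1) (pvD t)
      have hidx_take : ∀ k ∈ (pvD t).take (i + 1), (pvD t).idxOf k ≤ i := by
        intro k hk
        have h1 := pvIdxOf_of_prefix (List.take_prefix (i + 1) (pvD t)) hk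
        have h2 : ((pvD t).take (i + 1)).idxOf k < ((pvD t).take (i + 1)).length :=
          List.idxOf_lt_length_iff.mpr hk
        have h3 : ((pvD t).take (i + 1)).length ≤ i + 1 := by
          simp [List.length_take]
        omega
      have hidx_take' : ∀ k ∈ (pvD t).take i, (pvD t).idxOf k < i := by
        intro k hk
        have h1 := pvIdxOf_of_prefix (List.take_prefix i (pvD t)) hk
        have h2 : ((pvD t).take i).idxOf k < ((pvD t).take i).length :=
          List.idxOf_lt_length_iff.mpr hk
        have h3 : ((pvD t).take i).length ≤ i := by
          simp [List.length_take]
        omega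
      have hidx_drop : ∀ k ∈ (pvD t).drop (i + 1), i < (pvD t).idxOf k := by
        intro k hk
        rw [List.mem_iff_getElem] at hk
        obtain ⟨j, hj, he⟩ := hk
        rw [List.getElem_drop] at he
        have hlen : (List.drop (i + 1) (pvD t)).length = (pvD t).length - (i + 1) :=
          List.length_drop
        have hij : i + 1 + j < (pvD t).length := by omega
        have hidx : (pvD t).idxOf ((pvD t)[i + 1 + j]'hij) = i + 1 + j :=
          List.Nodup.idxOf_getElem (pvNodup_pvD t) (i + 1 + j) hij
        rw [he] at hidx
        omega
      have hbef_false : ∀ y ∈ ((pvD t).take (i + 1)).flatMap (pvG t),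
          decide (rk x < rk y) = false := by
        intro y hy
        obtain ⟨k, hk, hyk⟩ := List.mem_flatMap.mp hy
        obtain ⟨hrky, _⟩ := hrk_mem k (List.mem_of_mem_take hk) y hyk
        have := hidx_take k hk
        rw [hrkx, hrky]
        simp only [decide_eq_false_iff_not, not_lt]
        exact_mod_cast this
      have hbef_true : ∀ y ∈ ((pvD t).drop (i + 1)).flatMap (pvG t),
          decide (rk x < rk y) = true := by
        intro y hy
        obtain ⟨k, hk, hyk⟩ := List.mem_flatMap.mp hy
        obtain ⟨hrky, _⟩ := hrk_mem k (List.mem_of_mem_drop hk) y hyk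
        have := hidx_drop k hk
        rw [hrkx, hrky]
        simp only [decide_eq_true_eq]
        exact_mod_cast this
      have htake : (pvD t).take (i + 1) = (pvD t).take i ++ [pvKey x] := by
        rw [List.take_add_one, List.getElem?_eq_getElem hilt, hgetI]
        rfl
      have hne_take : ∀ k ∈ (pvD t).take i, k ≠ pvKey x := by
        intro k hk h
        have := hidx_take' k hk
        rw [h, ← hi] at this
        omega
      have hne_drop : ∀ k ∈ (pvD t).drop (i + 1), k ≠ pvKey x := by
        intro k hk h
        have := hidx_drop k hk
        rw [h, ← hi] at this
        omega
      calc PySem.List.insertBy (fun a b => decide (rk a < rk b)) x ((pvD t).flatMap (pvG t))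
          = PySem.List.insertBy (fun a b => decide (rk a < rk b)) x
              (((pvD t).take (i + 1)).flatMap (pvG t) ++ ((pvD t).drop (i + 1)).flatMap (pvG t)) := by
            conv_lhs => rw [← htd]
            rw [List.flatMap_append]
        _ = ((pvD t).take (i + 1)).flatMap (pvG t) ++ x :: ((pvD t).drop (i + 1)).flatMap (pvG t) :=
            pvInsertBy_split _ _ _ _ hbef_false hbef_true
        _ = (pvD t).flatMap (pvG (t ++ [x])) := by
            conv_rhs => rw [← htd]
            rw [List.flatMap_append, hfm _ hne_drop]
            rw [htake, List.flatMap_append, List.flatMap_append, hfm _ hne_take]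
            have hx1 : [pvKey x].flatMap (pvG (t ++ [x])) = pvG t (pvKey x) ++ [x] := by
              simp [hGsplit]
            have hx2 : [pvKey x].flatMap (pvG t) = pvG t (pvKey x) := by simp
            rw [hx1, hx2]
            simp
    · -- new key: x goes to the very end, forming its own group
      rw [hDx, if_neg hmem] at H ⊢
      have hkxD : pvKey x ∉ pvD t := by
        unfold pvD
        rw [PySem.List.mem_dedup]
        exact hmem
      have hrkx : rk x = ((pvD t).length : Int) := by
        have hH := H x (List.mem_append_right _ (List.mem_cons_self))
        rw [List.idxOf_append, if_neg hkxD] at hH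
        simpa using hH
      have hbef : ∀ y ∈ (pvD t).flatMap (pvG t), decide (rk x < rk y) = false := by
        intro y hy
        obtain ⟨k, hk, hyk⟩ := List.mem_flatMap.mp hy
        obtain ⟨hrky, _⟩ := hrk_mem k hk y hyk
        have : (pvD t).idxOf k < (pvD t).length := List.idxOf_lt_length_iff.mpr hk
        rw [hrkx, hrky]
        simp only [decide_eq_false_iff_not, not_lt]
        exact_mod_cast Nat.le_of_lt this
      rw [PySem.List.insertBy_of_forall_not_before _ _ _ hbef]
      rw [List.flatMap_append, hfm _ (fun k hk h => hkxD (h ▸ hk))]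
      have hGt_empty : pvG t (pvKey x) = [] := by
        unfold pvG
        rw [List.filter_eq_nil_iff]
        intro e he
        simp only [beq_iff_eq]
        intro h
        exact hmem (h ▸ List.mem_map_of_mem he)
      have hx1 : [pvKey x].flatMap (pvG (t ++ [x])) = [x] := by
        simp [hGsplit, hGt_empty]
      rw [hx1]

theorem pvGroup_items (arp : List (List (String × String))) :
    (arp.foldl (fun d entry =>
      let if_index := pvKey entry
      let d' := if d.contains if_index then d else d.insert if_index []
      d'.modify if_index [] (· ++ [entry])) PySem.Dict.empty).items =
    (pvD arp).map (fun k => (k, pvG arp k)) := by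
  unfold pvD pvG
  have hcol : ∀ (d : PySem.Dict String (List (List (String × String)))) (e : List (String × String)),
      (let if_index := pvKey e
       let d' := if d.contains if_index then d else d.insert if_index []
       d'.modify if_index [] (· ++ [e])) = d.modify (pvKey e) [] (· ++ [e]) := by
    intro d e
    show (if d.contains (pvKey e) then d else d.insert (pvKey e) []).modify (pvKey e) [] (· ++ [e]) =
      d.modify (pvKey e) [] (· ++ [e])
    by_cases h : d.contains (pvKey e) = true
    · simp [h]
    · have h' : d.contains (pvKey e) = false := by simpa using h
      simp only [h', Bool.false_eq_true, if_false]
      unfold PySem.Dict.modify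
      rw [PySem.Dict.getD_insert_self, PySem.Dict.insert_insert_self,
        PySem.Dict.getD_of_not_contains d _ h']
  rw [PySem.List.foldl_congr_mem _ _ (fun d e => d.modify (pvKey e) [] (· ++ [e])) _
    (fun acc x _ => hcol acc x)]
  have hnd : (arp.foldl (fun d e => d.modify (pvKey e) [] (· ++ [e])) PySem.Dict.empty).keys.Nodup := by
    exact PySem.Dict.nodup_keys_foldl_modify_key arp pvKey [] (fun _ x => (· ++ [x])) _
      (by rw [PySem.Dict.keys_empty]; exact List.nodup_nil)
  have hkeys : (arp.foldl (fun d e => d.modify (pvKey e) [] (· ++ [e])) PySem.Dict.empty).keys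
      = PySem.List.dedup (arp.map pvKey) := by
    rw [PySem.Dict.keys_foldl_modify_key arp pvKey [] (fun _ x => (· ++ [x])) _,
      PySem.Dict.keys_empty]
    rfl
  have hgetD : ∀ c, (arp.foldl (fun d e => d.modify (pvKey e) [] (· ++ [e])) PySem.Dict.empty).getD c []
      = arp.filter (fun e => pvKey e == c) := by
    intro c
    have hmap : List.foldl
        (fun (d : PySem.Dict String (List (List (String × String)))) (p : String × List (String × String)) => d.modify p.1 [] (· ++ [p.2]))
        PySem.Dict.empty (arp.map (fun e => (pvKey e, e)))
        = List.foldl (fun d e => d.modify (pvKey e) [] (· ++ [e])) PySem.Dict.empty arp := by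
      rw [List.foldl_map]
    rw [← hmap, PySem.Dict.getD_foldl_modify_append, PySem.Dict.getD_empty]
    simp [List.filter_map, Function.comp_def]
  rw [PySem.Dict.items_eq_map_keys _ hnd [], hkeys]
  exact List.map_congr_left (fun k _ => by rw [hgetD k])

theorem pvOrder_spec (arp : List (List (String × String))) :
    (arp.foldl (fun d e => d.setdefault (pvKey e) (d.size : Int)) PySem.Dict.empty).keys
        = pvD arp ∧
    ∀ k ∈ pvD arp,
      (arp.foldl (fun d e => d.setdefault (pvKey e) (d.size : Int)) PySem.Dict.empty).getD k 0
        = ((pvD arp).idxOf k : Int) := by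
  induction arp using List.reverseRecOn with
  | nil =>
    constructor
    · simp [pvD, PySem.List.dedup, PySem.Set.ofList_eq_foldl, PySem.Dict.keys_empty]
    · intro k hk
      simp [pvD, PySem.List.dedup, PySem.Set.ofList_eq_foldl] at hk
  | append_singleton t x ih =>
    obtain ⟨ihk, ihg⟩ := ih
    rw [List.foldl_append, List.foldl_cons, List.foldl_nil]
    have hDnew : pvD (t ++ [x]) = if pvKey x ∈ t.map pvKey then pvD t else pvD t ++ [pvKey x] := by
      unfold pvD
      rw [List.map_append, List.map_cons, List.map_nil, pvDedup_append_singleton]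
    set d := t.foldl (fun d e => d.setdefault (pvKey e) (d.size : Int)) PySem.Dict.empty with hd
    by_cases hmem : pvKey x ∈ t.map pvKey
    · have hc : d.contains (pvKey x) = true := by
        rw [PySem.Dict.contains_iff_mem_keys, ihk]
        unfold pvD
        exact (PySem.List.mem_dedup _ _).mpr hmem
      rw [PySem.Dict.setdefault_of_contains _ _ hc, hDnew, if_pos hmem]
      exact ⟨ihk, ihg⟩
    · have hc : d.contains (pvKey x) = false := by
        rw [Bool.eq_false_iff]
        intro hcon
        rw [PySem.Dict.contains_iff_mem_keys, ihk] at hcon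
        unfold pvD at hcon
        rw [PySem.List.mem_dedup] at hcon
        exact hmem hcon
      have hkx : pvKey x ∉ pvD t := by
        unfold pvD
        rw [PySem.List.mem_dedup]
        exact hmem
      rw [PySem.Dict.setdefault_of_not_contains _ _ hc, hDnew, if_neg hmem]
      have hsz : (d.size : Int) = ((pvD t).length : Int) := by
        have : d.keys.length = d.size := by
          unfold PySem.Dict.keys PySem.Dict.size; exact List.length_map ..
        rw [← this, ihk]
      constructor
      · rw [PySem.Dict.keys_insert_of_not_contains _ _ hc, ihk]
      · intro k hk
        rcases List.mem_append.mp hk with hk1 | hk2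
        · have hne : k ≠ pvKey x := fun h => hkx (h ▸ hk1)
          rw [PySem.Dict.getD_insert, if_neg hne, List.idxOf_append, if_pos hk1]
          exact ihg k hk1
        · have hke : k = pvKey x := by simpa using hk2
          subst hke
          rw [PySem.Dict.getD_insert, if_pos rfl, List.idxOf_append, if_neg hkx, hsz]
          simp

-- ===== VERDICT (by name: the statement is the Claim_ definition above) =====
theorem categorize_devices_spec : Claim_equal_categorize_devices := by
  intro arp interfaces _ _
  show categorize_devices arp interfaces = categorize_devices_alt arp interfaces
  have hA : categorize_devices arp interfaces =
      ((arp.foldl (fun d entry =>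
          let if_index := pvKey entry
          let d' := if d.contains if_index then d else d.insert if_index []
          d'.modify if_index [] (· ++ [entry])) PySem.Dict.empty).items.foldl
        (fun cats kv => kv.2.foldl (pvAStep (pvInterfaceName interfaces kv.1)) cats) pvInit).items := rfl
  have hB : categorize_devices_alt arp interfaces =
      ((PySem.List.sorted arp (fun e =>
          (arp.foldl (fun d e2 => d.setdefault (pvKey e2) (d.size : Int)) PySem.Dict.empty).getD
            (pvKey e) 0)).foldl (pvBStep interfaces) pvInit).items := rfl
  have hAside : ((pvD arp).map (fun k => (k, pvG arp k))).foldl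
        (fun cats kv => kv.2.foldl (pvAStep (pvInterfaceName interfaces kv.1)) cats) pvInit
      = ((pvD arp).flatMap (pvG arp)).foldl (pvFull interfaces) pvInit := by
    rw [List.foldl_map, List.flatMap_def, List.foldl_flatten, List.foldl_map]
    refine PySem.List.foldl_congr_mem _ _ _ _ (fun acc k hk => ?_)
    refine PySem.List.foldl_congr_mem _ _ _ _ (fun acc2 y hy => ?_)
    have hky : pvKey y = k := by
      unfold pvG at hy
      rw [List.mem_filter] at hy
      simpa using hy.2
    unfold pvFull
    rw [hky]
  have Hrk : ∀ e ∈ arp, (arp.foldl (fun d e2 => d.setdefault (pvKey e2) (d.size : Int))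
        PySem.Dict.empty).getD (pvKey e) 0 = ((pvD arp).idxOf (pvKey e) : Int) := by
    intro e he
    refine (pvOrder_spec arp).2 (pvKey e) ?_
    unfold pvD
    rw [PySem.List.mem_dedup]
    exact List.mem_map_of_mem he
  have hBside : (PySem.List.sorted arp (fun e =>
          (arp.foldl (fun d e2 => d.setdefault (pvKey e2) (d.size : Int)) PySem.Dict.empty).getD
            (pvKey e) 0)).foldl (pvBStep interfaces) pvInit
      = ((pvD arp).flatMap (pvG arp)).foldl (pvFull interfaces) pvInit := by
    have hsort := pvSorted_eq (fun e =>
      (arp.foldl (fun d e2 => d.setdefault (pvKey e2) (d.size : Int)) PySem.Dict.empty).getD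
        (pvKey e) 0) arp Hrk
    rw [PySem.List.sorted_eq_foldl_insertBy, hsort]
    exact PySem.List.foldl_congr_mem _ _ _ _ (fun acc y _ => pvStep_eq interfaces acc y)
  rw [hA, hB, pvGroup_items, hAside, hBside]
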